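-- pv_equiv track=rewrite | github.com/hpi-dhc/nge_db | evaluation/metrics.py | expand_filters
-- ===== SOURCE A (Python) =====
-- import itertools
--
-- def expand_filters(
--     filters: dict[str, str | None], include_combos_with_or: bool = True
-- ) -> dict[str, str | None]:
--     """Expand the filters to include all combinations of filters."""
--     expanded_filters: dict[str, str] = {}
--     filters_without_none = {k: v for k, v in filters.items() if v is not None}
--     filters_with_none = {k: v for k, v in filters.items() if v is None}
--     for r in range(1, len(filters) + 1):
--         for combo in itertools.combinations(filters_without_none.items(), r):
--             desc, queries = zip(*combo)
--             combined_query = " & ".join(q for q in queries if q is not None)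
--             expanded_filters[" & ".join(desc)] = combined_query
--
--             if include_combos_with_or:
--                 combined_query_or = " | ".join(q for q in queries if q is not None)
--                 expanded_filters[" | ".join(desc)] = combined_query_or
--
--     all_filters: dict[str, str | None] = {**filters_with_none, **expanded_filters}
--     return all_filters
-- ===== SOURCE B (Python) =====
-- def expand_filters(filters, include_combos_with_or=True):
--     """Expand the filters to include all combinations of filters."""
--     items = [(k, v) for k, v in filters.items() if v is not None]
--     result = {k: v for k, v in filters.items() if v is None}
--     expanded = {}
--     for r in range(1, len(filters) + 1):
--         for d_and, d_or, q_and, q_or in _joined_combos(items, r):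
--             expanded[d_and] = q_and
--             if include_combos_with_or:
--                 expanded[d_or] = q_or
--     result.update(expanded)
--     return result
--
--
-- def _joined_combos(items, r):
--     """All r-element combinations of items (original order), already joined:
--     tuples (descs joined by ' & ', descs joined by ' | ', queries joined by ' & ',
--     queries joined by ' | '), in the same lexicographic order as itertools.combinations."""
--     if not items:
--         return []
--     (k, v), rest = items[0], items[1:]
--     if r == 1:
--         head = [(k, k, v, v)]
--     else:
--         head = [(k + " & " + da, k + " | " + do_, v + " & " + qa, v + " | " + qo)
--                 for (da, do_, qa, qo) in _joined_combos(rest, r - 1)]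
--     return head + _joined_combos(rest, r)
-- ===== Notes on version B (the rewrite author's own statement) =====
-- stated objective: alternative
-- what changed: replaces the itertools.combinations + zip(*combo) + per-combo str.join pipeline with a recursive helper that enumerates the combinations itself and builds the '&'/'|'-joined key and query strings directly during the recursion (no tuples, no zip, no join calls)
import Mathlib
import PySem

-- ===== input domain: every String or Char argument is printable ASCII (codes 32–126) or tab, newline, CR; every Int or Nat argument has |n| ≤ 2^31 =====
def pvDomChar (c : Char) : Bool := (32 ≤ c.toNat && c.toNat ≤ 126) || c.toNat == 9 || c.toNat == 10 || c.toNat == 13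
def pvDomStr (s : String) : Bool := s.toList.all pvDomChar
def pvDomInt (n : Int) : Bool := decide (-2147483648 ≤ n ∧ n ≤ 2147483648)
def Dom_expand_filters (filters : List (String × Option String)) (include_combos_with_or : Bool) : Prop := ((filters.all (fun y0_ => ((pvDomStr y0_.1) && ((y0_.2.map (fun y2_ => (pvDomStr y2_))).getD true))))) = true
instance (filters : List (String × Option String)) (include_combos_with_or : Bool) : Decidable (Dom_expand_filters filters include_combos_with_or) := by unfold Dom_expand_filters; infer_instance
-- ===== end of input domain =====

-- B enumerates the combinations with a recursive helper that builds the joined key/query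
-- strings directly, instead of A's itertools.combinations + zip + str.join pipeline
-- (objective: alternative; same cost).

-- ===== PORT A =====
-- itertools.combinations(xs, r): every r-element combination, lexicographic order of positions
def pyCombinations {α : Type} : List α → Nat → List (List α)
  | _, 0 => [[]]
  | [], _ + 1 => []
  | x :: xs, r + 1 => (pyCombinations xs r).map (x :: ·) ++ pyCombinations xs (r + 1)

-- Port of A. The dict argument is its association list (a Python dict: keys distinct, insertion
-- order), so the two dict comprehensions over filters.items() are list filters, and the final
-- merge {**filters_with_none, **expanded_filters} is a fold of inserts over both item lists.
-- 'q for q in queries if q is not None' keeps every element (values of filters_without_none are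
-- never None), so it is ported as 'queries' itself. r drawn from range(1, len+1) is ≥ 1, so
-- r.toNat is exact.
def expand_filters (filters : List (String × Option String)) (include_combos_with_or : Bool) : List (String × Option String) :=
  let filtersWithoutNone : List (String × String) :=
    filters.filterMap (fun kv => kv.2.map (fun v => (kv.1, v)))
  let filtersWithNone : List (String × Option String) :=
    filters.filter (fun kv => kv.2 == none)
  let expanded : PySem.Dict String String :=
    (PySem.List.pyRange 1 (PySem.List.len filters + 1) 1).foldl (fun d r =>
      (pyCombinations filtersWithoutNone r.toNat).foldl (fun d combo =>
        let desc := combo.map Prod.fst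
        let queries := combo.map Prod.snd
        let combined_query := PySem.Str.join " & " queries
        let d := d.insert (PySem.Str.join " & " desc) combined_query
        if include_combos_with_or then
          d.insert (PySem.Str.join " | " desc) (PySem.Str.join " | " queries)
        else d) d) PySem.Dict.empty
  ((filtersWithNone ++ expanded.items.map (fun kv => (kv.1, some kv.2))).foldl
    (fun d kv => d.insert kv.1 kv.2) (PySem.Dict.empty : PySem.Dict String (Option String))).items

-- ===== PORT B =====
-- _joined_combos(items, r): the r-element combinations, already joined into
-- (descs with ' & ', descs with ' | ', queries with ' & ', queries with ' | ')
def joinedCombos : List (String × String) → Nat → List (String × String × String × String)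
  | [], _ => []
  | (k, v) :: rest, r =>
    (if r == 1 then [(k, k, v, v)]
     else (joinedCombos rest (r - 1)).map (fun t =>
       (k ++ " & " ++ t.1, k ++ " | " ++ t.2.1, v ++ " & " ++ t.2.2.1, v ++ " | " ++ t.2.2.2)))
    ++ joinedCombos rest r

-- Port of B (same dict-as-association-list reading as in A's port; r.toNat exact since r ≥ 1)
def expand_filters_alt (filters : List (String × Option String)) (include_combos_with_or : Bool) : List (String × Option String) :=
  let items : List (String × String) :=
    filters.filterMap (fun kv => kv.2.map (fun v => (kv.1, v)))
  let result0 : PySem.Dict String (Option String) :=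
    (filters.filter (fun kv => kv.2 == none)).foldl
      (fun d kv => d.insert kv.1 kv.2) PySem.Dict.empty
  let expanded : PySem.Dict String String :=
    (PySem.List.pyRange 1 (PySem.List.len filters + 1) 1).foldl (fun d r =>
      (joinedCombos items r.toNat).foldl (fun d t =>
        let d := d.insert t.1 t.2.2.1
        if include_combos_with_or then d.insert t.2.1 t.2.2.2 else d) d) PySem.Dict.empty
  (expanded.items.foldl (fun d kv => d.insert kv.1 (some kv.2)) result0).items

-- ===== PRECONDITION & SPEC =====
def Spec_expand_filters (filters : List (String × Option String)) (include_combos_with_or : Bool) (out : List (String × Option String)) : Prop := out = expand_filters_alt filters include_combos_with_or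
instance (filters : List (String × Option String)) (include_combos_with_or : Bool) (out : List (String × Option String)) : Decidable (Spec_expand_filters filters include_combos_with_or out) := by unfold Spec_expand_filters; infer_instance

-- ===== CLAIM (what is proved, stated in full; the proofs are below) =====
def Claim_equal_expand_filters : Prop := ∀ (filters : List (String × Option String)) (include_combos_with_or : Bool), Dom_expand_filters filters include_combos_with_or → Spec_expand_filters filters include_combos_with_or (expand_filters filters include_combos_with_or)

-- ===== LEMMAS AND PROOFS =====

theorem sjoin_singleton (sep x : String) : PySem.Str.join sep [x] = x := by
  apply String.toList_inj.mp
  simp [PySem.Str.toList_join, PySem.Chars.join_singleton]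

theorem sjoin_cons_cons (sep x y : String) (ys : List String) :
    PySem.Str.join sep (x :: y :: ys) = x ++ sep ++ PySem.Str.join sep (y :: ys) := by
  apply String.toList_inj.mp
  simp [PySem.Str.toList_join, PySem.Chars.join_cons_cons]

theorem pyCombinations_ne_nil {α : Type} (xs : List α) (r : Nat) (c : List α)
    (hc : c ∈ pyCombinations xs (r + 1)) : c ≠ [] := by
  induction xs generalizing r c with
  | nil => simp [pyCombinations] at hc
  | cons x xs ih =>
    simp only [pyCombinations, List.mem_append, List.mem_map] at hc
    rcases hc with ⟨c', _, rfl⟩ | h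
    · simp
    · exact ih r c h

-- the tuple B's helper produces, described as A produces it
def combF (c : List (String × String)) : String × String × String × String :=
  (PySem.Str.join " & " (c.map Prod.fst), PySem.Str.join " | " (c.map Prod.fst),
   PySem.Str.join " & " (c.map Prod.snd), PySem.Str.join " | " (c.map Prod.snd))

theorem joinedCombos_eq (xs : List (String × String)) (r : Nat) (hr : 1 ≤ r) :
    joinedCombos xs r = (pyCombinations xs r).map combF := by
  induction xs generalizing r with
  | nil =>
    cases r with
    | zero => omega
    | succ s => simp [joinedCombos, pyCombinations]
  | cons x xs ih =>
    obtain ⟨k, v⟩ := x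
    cases r with
    | zero => omega
    | succ s =>
      cases s with
      | zero =>
        simp only [joinedCombos, pyCombinations, List.map_append, List.map_cons,
          List.map_nil, ih 1 (le_refl 1)]
        simp [combF, sjoin_singleton]
      | succ s =>
        have hne : ¬ ((s + 2 : Nat) == 1) = true := by simp
        simp only [joinedCombos, pyCombinations, List.map_append, if_neg hne,
          Nat.add_sub_cancel, ih (s + 1) (by omega), ih (s + 2) (by omega),
          List.map_map]
        congr 1
        apply List.map_congr_left
        intro c hc
        obtain ⟨y, ys, rfl⟩ := List.exists_cons_of_ne_nil (pyCombinations_ne_nil xs s c hc)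
        simp [combF, Function.comp, sjoin_cons_cons]

-- ===== VERDICT (by name: the statement is the Claim_ definition above) =====
theorem expand_filters_spec : Claim_equal_expand_filters := by
  intro filters b _
  unfold Spec_expand_filters expand_filters expand_filters_alt
  dsimp only
  rw [List.foldl_append, List.foldl_map]
  congr 3
  apply PySem.List.foldl_congr_mem
  intro d r hr
  have h1 : (1:Int) ≤ r := ((PySem.List.mem_pyRange_one).mp hr).1
  have h1n : 1 ≤ r.toNat := by omega
  rw [joinedCombos_eq _ _ h1n, List.foldl_map]
  simp only [combF]
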